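-- pv_equiv track=rewrite | github.com/OriC28/temporal | Python/Práctica/exercise_text.py | get_numbers
-- ===== SOURCE A (Python) =====
-- def get_numbers(numbers):
-- 	sumatory = []
-- 	temp = 0
-- 	first_result = numbers[0]*2 + 3
-- 	sumatory.append(first_result)
--
-- 	for i in numbers[1:]:
-- 		temp = first_result + i*2 + 3
-- 		sumatory.append(temp)
-- 		first_result = temp
--
-- 	return sumatory
-- ===== SOURCE B (Python) =====
-- def get_numbers(numbers):
--     # Compute the grand total 2*sum + 3*n in closed form, then fill the output
--     # back-to-front, subtracting each element's contribution from the total.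
--     n = len(numbers)
--     total = 2 * sum(numbers) + 3 * n
--     out = [0] * n
--     for k in range(n - 1, -1, -1):
--         out[k] = total
--         total -= 2 * numbers[k] + 3
--     return out
-- ===== Notes on version B (the rewrite author's own statement) =====
-- stated objective: alternative
-- what changed: Instead of A's forward loop accumulating a running total, B computes the grand total 2*sum(numbers)+3*len(numbers) in closed form once and then fills the output array back-to-front, subtracting each element's 2*x+3 contribution from the total.
import Mathlib
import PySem

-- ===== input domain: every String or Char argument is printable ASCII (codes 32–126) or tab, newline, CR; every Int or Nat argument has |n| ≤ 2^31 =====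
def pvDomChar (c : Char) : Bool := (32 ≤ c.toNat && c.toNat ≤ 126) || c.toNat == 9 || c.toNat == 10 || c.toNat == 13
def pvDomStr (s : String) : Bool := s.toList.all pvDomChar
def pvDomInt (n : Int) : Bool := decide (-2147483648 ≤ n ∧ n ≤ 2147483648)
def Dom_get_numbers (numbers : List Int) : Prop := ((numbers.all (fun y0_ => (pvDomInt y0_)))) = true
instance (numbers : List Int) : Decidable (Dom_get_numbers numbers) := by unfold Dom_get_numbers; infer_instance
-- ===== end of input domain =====

-- B replaces A's forward running-total loop by a closed-form grand total
-- (2*sum + 3*n) from which the output is filled back-to-front by subtraction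
-- ('alternative' objective, same cost); the empty list (A raises IndexError) is excluded by Pre_.


-- ===== PORT A =====
-- A: sumatory starts with numbers[0]*2+3; the loop over numbers[1:] appends
-- first_result + i*2 + 3 and updates first_result. numbers[0] raises on [] (excluded by Pre_).
def get_numbers (numbers : List Int) : List Int :=
  match numbers with
  | [] => []   -- Python raises IndexError here; excluded by Pre_get_numbers
  | n0 :: rest =>
    let first_result := n0 * 2 + 3
    (rest.foldl (fun (st : List Int × Int) i =>
      let temp := st.2 + i * 2 + 3
      (st.1 ++ [temp], temp)) ([first_result], first_result)).1

-- ===== PORT B =====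
-- the descending fill loop: iterates the reversed list (k = n-1 … 0); writing
-- out[k] = total before any smaller index is a prepend to the list built so far.
def fillBack : List Int → Int → List Int → List Int
  | [], _, out => out
  | x :: revRest, total, out => fillBack revRest (total - (2 * x + 3)) (total :: out)

def get_numbers_alt (numbers : List Int) : List Int :=
  let total := 2 * numbers.sum + 3 * (numbers.length : Int)
  fillBack numbers.reverse total []

-- ===== PRECONDITION & SPEC =====
-- Pre_ excludes the empty list, on which Python A raises IndexError (numbers[0]).
def Pre_get_numbers (numbers : List Int) : Prop := numbers ≠ []
instance (numbers : List Int) : Decidable (Pre_get_numbers numbers) := by unfold Pre_get_numbers; infer_instance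
def pvWitness_get_numbers : List Int := [1, 2, 3]

def Spec_get_numbers (numbers : List Int) (out : List Int) : Prop := out = get_numbers_alt numbers
instance (numbers : List Int) (out : List Int) : Decidable (Spec_get_numbers numbers out) := by unfold Spec_get_numbers; infer_instance

-- ===== CLAIM (what is proved, stated in full; the proofs are below) =====
def Claim_equal_get_numbers : Prop := ∀ (numbers : List Int), Dom_get_numbers numbers → Pre_get_numbers numbers → Spec_get_numbers numbers (get_numbers numbers)

-- ===== LEMMAS AND PROOFS =====

-- forward reference list: the running-total scan both programs' outputs equal
def scanA (t : Int) : List Int → List Int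
  | [] => []
  | x :: xs => (t + x * 2 + 3) :: scanA (t + x * 2 + 3) xs

theorem foldlA_eq_scanA (xs : List Int) (acc : List Int) (t : Int) :
    (xs.foldl (fun (st : List Int × Int) i =>
      (st.1 ++ [st.2 + i * 2 + 3], st.2 + i * 2 + 3)) (acc, t)).1
    = acc ++ scanA t xs := by
  induction xs generalizing acc t with
  | nil => simp [scanA]
  | cons x xs ih => simp [scanA, ih]

-- descending scan produced by fillBack (before the final reversal by prepending)
def scanDown (t : Int) : List Int → List Int
  | [] => []
  | x :: xs => t :: scanDown (t - (2 * x + 3)) xs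

theorem fillBack_eq_scanDown (xs : List Int) (t : Int) (out : List Int) :
    fillBack xs t out = (scanDown t xs).reverse ++ out := by
  induction xs generalizing t out with
  | nil => simp [fillBack, scanDown]
  | cons x xs ih => simp [fillBack, scanDown, ih]

def fsum (xs : List Int) : Int := (xs.map (fun x => 2 * x + 3)).sum

theorem fsum_reverse (xs : List Int) : fsum xs.reverse = fsum xs := by
  simp [fsum]

theorem scanDown_append (u v : List Int) (t : Int) :
    scanDown t (u ++ v) = scanDown t u ++ scanDown (t - fsum u) v := by
  induction u generalizing t with
  | nil => simp [scanDown, fsum]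
  | cons x u ih =>
    simp only [List.cons_append, scanDown, ih, fsum, List.map_cons, List.sum_cons]
    congr 2
    ring_nf

theorem scanDown_rev_eq_scanA (xs : List Int) (a : Int) :
    (scanDown (a + fsum xs) xs.reverse).reverse = scanA a xs := by
  induction xs generalizing a with
  | nil => simp [scanDown, scanA]
  | cons x xs ih =>
    have hs : scanDown (a + fsum (x :: xs)) (x :: xs).reverse
        = scanDown (a + fsum (x :: xs)) xs.reverse
          ++ scanDown (a + fsum (x :: xs) - fsum xs.reverse) [x] := by
      simpa using scanDown_append xs.reverse [x] (a + fsum (x :: xs))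
    have h1 : a + fsum (x :: xs) = (a + (2 * x + 3)) + fsum xs := by
      simp [fsum]; ring
    have h2 : a + fsum (x :: xs) - fsum xs.reverse = a + (2 * x + 3) := by
      rw [fsum_reverse, h1]; ring
    rw [hs, h2, h1]
    simp only [scanDown, List.reverse_append, List.reverse_cons, List.reverse_nil,
      List.nil_append, List.cons_append]
    rw [ih (a + (2 * x + 3))]
    have h3 : a + (2 * x + 3) = a + x * 2 + 3 := by ring
    rw [h3]; simp [scanA]

theorem fsum_closed (xs : List Int) : fsum xs = 2 * xs.sum + 3 * (xs.length : Int) := by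
  induction xs with
  | nil => simp [fsum]
  | cons x xs ih => simp [fsum] at ih ⊢; rw [ih]; ring

theorem alt_eq_scanA (xs : List Int) : get_numbers_alt xs = scanA 0 xs := by
  unfold get_numbers_alt
  rw [fillBack_eq_scanDown, ← fsum_closed]
  simpa using scanDown_rev_eq_scanA xs 0

-- ===== VERDICT (by name: the statement is the Claim_ definition above) =====
theorem get_numbers_spec : Claim_equal_get_numbers := by
  intro numbers _ hpre
  cases numbers with
  | nil => exact absurd rfl hpre
  | cons n0 rest =>
    show _ = _
    rw [alt_eq_scanA]
    simp only [get_numbers, foldlA_eq_scanA, scanA]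
    simp
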